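-- pv_equiv track=rewrite | github.com/Cho-El/Python-coding-test-practice | 프로그래머스 문제/파이썬/grep코딩테스트/1.py | solution
-- ===== SOURCE A (Python) =====
-- from collections import deque
--
-- def solution(n, text, second):
--     answer = deque(['_' for _ in range(n)])
--     q1 = deque(['_' for _ in range(n)])
--     while second != 0:
--         # text 다돌기
--         for t in text:
--             second -= 1
--             answer.popleft()
--             if t == ' ':
--                 answer.append('_')
--             else:
--                 answer.append(t)
--
--             # second가 0이 되었다면 break
--             if second == 0:
--                 break
--         else:
--             # text를 다 돌았다면 '_'를 추가하기
--             for _ in range(n):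
--                 second -= 1
--                 answer.popleft()
--                 answer.append('_')
--                 if second == 0:
--                     break
--
--     answer = ''.join(answer)
--     return answer
-- ===== SOURCE B (Python) =====
-- def solution(n, text, second):
--     period = ''.join('_' if c == ' ' else c for c in text) + '_' * n
--     if second <= n:
--         return '_' * (n - second) + period[:second]
--     p = len(period)
--     start = (second - n) % p
--     chunk = period[start:start + n]
--     if len(chunk) < n:
--         chunk += period[:n - len(chunk)]
--     return chunk
-- ===== Notes on version B (the rewrite author's own statement) =====
-- stated objective: alternative
-- what changed: B replaces A's tick-by-tick deque simulation (one pop/append per elapsed second) with a closed form: the pushed stream is periodic with period len(text)+n, so B reduces second modulo the period and reads the n-character window directly out of one period with at most one wrap; Pre_ excludes negative second (A never terminates), positive second with n<1 (A loops forever or pops an empty deque), and the corner n<0 with empty text at second=0, where A returns '' but B's modular reduction divides by zero.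
-- outside the precondition, e.g. on solution(-1, '', 0): A returns '', B raises ZeroDivisionError
import Mathlib
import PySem

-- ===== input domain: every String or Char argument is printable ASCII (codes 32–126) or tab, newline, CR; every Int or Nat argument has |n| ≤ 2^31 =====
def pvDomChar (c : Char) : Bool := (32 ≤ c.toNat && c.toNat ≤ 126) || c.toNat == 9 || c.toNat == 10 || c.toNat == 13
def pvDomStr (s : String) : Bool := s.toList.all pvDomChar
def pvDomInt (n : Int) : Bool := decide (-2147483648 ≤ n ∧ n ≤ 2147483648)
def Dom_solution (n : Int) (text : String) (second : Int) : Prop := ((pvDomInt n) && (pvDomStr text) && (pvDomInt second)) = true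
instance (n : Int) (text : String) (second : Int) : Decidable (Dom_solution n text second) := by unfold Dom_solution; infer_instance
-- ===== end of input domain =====

-- B computes the scroll window by periodicity (second mod (len(text)+n)) instead of simulating every tick; equivalence is about the return value only.

-- ===== PORT A =====
-- inner 'for t in text' loop: decrement second, popleft, append, break when second == 0
-- result: (answer, second, brokeOut)
def pvInner : List Char → List Char → Int → (List Char × Int × Bool)
  | [], ans, s => (ans, s, false)
  | t :: ts, ans, s =>
    let s' := s - 1
    let ans' := ans.drop 1 ++ [if t = ' ' then '_' else t]
    if s' = 0 then (ans', s', true) else pvInner ts ans' s'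

-- the 'else' branch's 'for _ in range(n)' loop pushing '_', with its break
def pvPad : Nat → List Char → Int → (List Char × Int)
  | 0, ans, s => (ans, s)
  | k + 1, ans, s =>
    let s' := s - 1
    let ans' := ans.drop 1 ++ ['_']
    if s' = 0 then (ans', s') else pvPad k ans' s'

-- 'while second != 0' loop; fuel bounds the iteration count (each iteration that runs consumes ≥ 1 second on Pre_)
def pvOuter (text : List Char) (n : Nat) : Nat → List Char → Int → List Char
  | 0, ans, _ => ans
  | fuel + 1, ans, s =>
    if s = 0 then ans
    else
      let r := pvInner text ans s
      if r.2.2 then pvOuter text n fuel r.1 r.2.1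
      else
        let r2 := pvPad n r.1 r.2.1
        pvOuter text n fuel r2.1 r2.2

def solution (n : Int) (text : String) (second : Int) : String :=
  String.ofList (pvOuter text.toList n.toNat (second.toNat + 1) (List.replicate n.toNat '_') second)

-- ===== PORT B =====
def solution_alt (n : Int) (text : String) (second : Int) : String :=
  let period : List Char := text.toList.map (fun c => if c = ' ' then '_' else c) ++ List.replicate n.toNat '_'
  if second ≤ n then
    String.ofList (List.replicate (n - second).toNat '_' ++ PySem.List.slice period none (some second))
  else
    let p : Int := period.length
    let start := PySem.Int.mod (second - n) p
    let chunk := PySem.List.slice period (some start) (some (start + n))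
    let chunk2 := if (chunk.length : Int) < n then chunk ++ PySem.List.slice period none (some (n - chunk.length)) else chunk
    String.ofList chunk2

-- ===== PRECONDITION & SPEC =====
-- Pre_ excludes: second < 0 (A's while loop never terminates), second > 0 with n < 1 (A loops forever or
-- pops an empty deque, IndexError), and n < 0 with empty text at second = 0 (A returns '' but B divides by len(text)+n = 0).
def Pre_solution (n : Int) (text : String) (second : Int) : Prop :=
  0 ≤ second ∧ (second = 0 ∨ 1 ≤ n) ∧ (0 ≤ n ∨ text ≠ "")
instance (n : Int) (text : String) (second : Int) : Decidable (Pre_solution n text second) := by unfold Pre_solution; infer_instance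
def pvWitness_solution : Int × String × Int := (3, "ab c", 7)

def Spec_solution (n : Int) (text : String) (second : Int) (out : String) : Prop := out = solution_alt n text second
instance (n : Int) (text : String) (second : Int) (out : String) : Decidable (Spec_solution n text second out) := by unfold Spec_solution; infer_instance

-- ===== CLAIM (what is proved, stated in full; the proofs are below) =====
def Claim_equal_solution : Prop := ∀ (n : Int) (text : String) (second : Int), Dom_solution n text second → Pre_solution n text second → Spec_solution n text second (solution n text second)

-- ===== LEMMAS AND PROOFS =====

-- the sliding window: push one char = drop the head, append the char
def pvPush (ans : List Char) (cs : List Char) : List Char :=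
  cs.foldl (fun a c => a.drop 1 ++ [c]) ans

-- first k characters of the infinite periodic stream cycle(per)
def pvCyc (per : List Char) (k : Nat) : List Char :=
  (List.range k).map (fun i => per.getD (i % per.length) '_')

theorem pvPush_append (ans xs ys : List Char) : pvPush ans (xs ++ ys) = pvPush (pvPush ans xs) ys := by
  simp [pvPush, List.foldl_append]

theorem pvPush_eq_drop (cs : List Char) : ∀ ans : List Char, ans ≠ [] →
    pvPush ans cs = (ans ++ cs).drop cs.length := by
  induction cs with
  | nil => intro ans _; simp [pvPush]
  | cons c cs ih =>
    intro ans h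
    cases ans with
    | nil => exact absurd rfl h
    | cons a as =>
      have h1 : pvPush (a :: as) (c :: cs) = pvPush (as ++ [c]) cs := rfl
      rw [h1, ih _ (by simp)]
      simp [List.append_assoc]

theorem pvCyc_small {per : List Char} {k : Nat} (h : k ≤ per.length) :
    pvCyc per k = per.take k := by
  apply List.ext_getElem
  · simp [pvCyc]; omega
  · intro i h1 h2
    have hik : i < k := by simpa [pvCyc] using h1
    have hil : i < per.length := lt_of_lt_of_le hik h
    simp [pvCyc, Nat.mod_eq_of_lt hil, List.getElem?_eq_getElem hil]

theorem pvCyc_ge {per : List Char} {k : Nat} (h : per.length ≤ k) :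
    pvCyc per k = per ++ pvCyc per (k - per.length) := by
  have hk : k = per.length + (k - per.length) := by omega
  rw [pvCyc]
  conv_lhs => rw [hk]
  rw [List.range_add, List.map_append]
  congr 1
  · have : (List.range per.length).map (fun i => per.getD (i % per.length) '_') = pvCyc per per.length := rfl
    rw [this, pvCyc_small le_rfl, List.take_length]
  · rw [List.map_map, pvCyc]
    apply List.map_congr_left
    intro i _
    simp [Nat.add_mod_left]

-- inner loop characterisations (0 < s)
theorem pvInner_break : ∀ (ts ans : List Char) (s : Int), 0 < s → s ≤ (ts.length : Int) →
    pvInner ts ans s = (pvPush ans ((ts.take s.toNat).map (fun t => if t = ' ' then '_' else t)), 0, true) := by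
  intro ts
  induction ts with
  | nil => intro ans s hs hle; simp at hle; omega
  | cons t ts ih =>
    intro ans s hs hle
    simp only [pvInner]
    by_cases h1 : s - 1 = 0
    · have hs1 : s.toNat = 1 := by omega
      simp [h1, hs1, pvPush]
    · have hkm : s.toNat = (s - 1).toNat + 1 := by omega
      rw [if_neg h1, ih _ (s - 1) (by omega) (by simp at hle ⊢; omega)]
      rw [hkm, List.take_succ_cons]
      rfl

theorem pvInner_all : ∀ (ts ans : List Char) (s : Int), (ts.length : Int) < s →
    pvInner ts ans s = (pvPush ans (ts.map (fun t => if t = ' ' then '_' else t)), s - ts.length, false) := by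
  intro ts
  induction ts with
  | nil => intro ans s _; simp [pvInner, pvPush]
  | cons t ts ih =>
    intro ans s hlt
    simp only [pvInner]
    have h1 : s - 1 ≠ 0 := by simp at hlt; omega
    rw [if_neg h1, ih _ (s - 1) (by simp at hlt ⊢; omega)]
    have : s - 1 - (ts.length : Int) = s - ((t :: ts).length : Int) := by simp; omega
    rw [this]
    rfl

theorem pvPad_break : ∀ (k : Nat) (ans : List Char) (s : Int), 0 < s → s ≤ (k : Int) →
    pvPad k ans s = (pvPush ans (List.replicate s.toNat '_'), 0) := by
  intro k
  induction k with
  | zero => intro ans s hs hle; omega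
  | succ k ih =>
    intro ans s hs hle
    simp only [pvPad]
    by_cases h1 : s - 1 = 0
    · have hs1 : s.toNat = 1 := by omega
      simp [h1, hs1, pvPush]
    · have hkm : s.toNat = (s - 1).toNat + 1 := by omega
      rw [if_neg h1, ih _ (s - 1) (by omega) (by push_cast at hle ⊢; omega)]
      rw [hkm, List.replicate_succ]
      rfl

theorem pvPad_all : ∀ (k : Nat) (ans : List Char) (s : Int), (k : Int) < s →
    pvPad k ans s = (pvPush ans (List.replicate k '_'), s - k) := by
  intro k
  induction k with
  | zero => intro ans s _; simp [pvPad, pvPush]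
  | succ k ih =>
    intro ans s hlt
    simp only [pvPad]
    have h1 : s - 1 ≠ 0 := by push_cast at hlt; omega
    rw [if_neg h1, ih _ (s - 1) (by push_cast at hlt ⊢; omega)]
    have : s - 1 - (k : Int) = s - ((k + 1 : Nat) : Int) := by push_cast; omega
    rw [this, List.replicate_succ]
    rfl

-- the outer loop pushes exactly the first s characters of cycle(per)
theorem pvOuter_eq (tl : List Char) (m : Nat) (hm : 1 ≤ m) :
    ∀ (fuel : Nat) (s : Int) (ans : List Char), 0 ≤ s → s ≤ (fuel : Int) →
    pvOuter tl m fuel ans s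
      = pvPush ans (pvCyc (tl.map (fun t => if t = ' ' then '_' else t) ++ List.replicate m '_') s.toNat) := by
  set tl' := tl.map (fun t => if t = ' ' then '_' else t) with htl'
  set per := tl' ++ List.replicate m '_' with hper
  have hlen : per.length = tl.length + m := by simp [hper, htl']
  have hp : 0 < per.length := by omega
  intro fuel
  induction fuel with
  | zero =>
    intro s ans h0 hle
    have : s = 0 := by omega
    simp [this, pvOuter, pvCyc, pvPush]
  | succ fuel ih =>
    intro s ans h0 hle
    by_cases hs0 : s = 0
    · simp [hs0, pvOuter, pvCyc, pvPush]
    · have hspos : 0 < s := by omega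
      have hnil : ∀ x : List Char, pvPush x [] = x := fun _ => rfl
      have h1 : pvCyc per 0 = [] := by simp [pvCyc]
      simp only [pvOuter, if_neg hs0]
      by_cases hsl : s ≤ (tl.length : Int)
      · rw [pvInner_break tl ans s hspos hsl]
        simp only [if_true]
        rw [ih 0 _ le_rfl (by positivity)]
        rw [show ((0:Int)).toNat = 0 from rfl, h1, hnil]
        rw [pvCyc_small (by omega : s.toNat ≤ per.length)]
        have h2 : s.toNat ≤ tl'.length := by simp [htl']; omega
        congr 1
        rw [hper, List.take_append, Nat.sub_eq_zero_of_le h2, List.take_zero, List.append_nil, htl', List.map_take]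
      · rw [pvInner_all tl ans s (by omega)]
        simp only [Bool.false_eq_true, if_false]
        by_cases hsm : s - tl.length ≤ (m : Int)
        · rw [pvPad_break m _ _ (by omega) hsm]
          simp only
          rw [ih 0 _ le_rfl (by positivity)]
          rw [show ((0:Int)).toNat = 0 from rfl, h1, hnil, ← pvPush_append]
          rw [pvCyc_small (by omega : s.toNat ≤ per.length)]
          congr 1
          have hs2 : s.toNat = tl'.length + (s - tl.length).toNat := by simp [htl']; omega
          rw [hper, hs2, List.take_append, List.take_of_length_le (by omega), Nat.add_sub_cancel_left,
            List.take_replicate]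
          congr 2
          omega
        · rw [pvPad_all m _ _ (by omega)]
          simp only
          rw [ih (s - tl.length - m) _ (by omega) (by push_cast at hle ⊢; omega)]
          rw [← htl', pvCyc_ge (by omega : per.length ≤ s.toNat)]
          have he : (s - (tl.length : Int) - (m : Int)).toNat = s.toNat - per.length := by omega
          rw [he]
          conv_rhs => rw [hper, List.append_assoc, pvPush_append]
          rw [pvPush_append, ← hper]

-- after the first n ticks the window lies inside the periodic stream: read it from one period, wrapping once
theorem pvWrap (per : List Char) (m k : Nat) (hp : 0 < per.length) (hm : m ≤ per.length) (hk : m ≤ k) :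
    (pvCyc per k).drop (k - m)
      = (per.drop ((k - m) % per.length)).take m
        ++ per.take (m - ((per.drop ((k - m) % per.length)).take m).length) := by
  have hstlt : (k - m) % per.length < per.length := Nat.mod_lt _ hp
  have hcl : ((per.drop ((k - m) % per.length)).take m).length
      = min m (per.length - (k - m) % per.length) := by simp
  have hmod : ∀ i : Nat, (k - m + i) % per.length = ((k - m) % per.length + i) % per.length :=
    fun i => (Nat.mod_add_mod (k - m) per.length i).symm
  apply List.ext_getElem
  · simp [pvCyc]; omega
  · intro i h1 h2
    have him : i < m := by simp [pvCyc] at h1; omega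
    simp only [pvCyc, List.getElem_drop, List.getElem_map, List.getElem_range, List.getElem_append]
    split
    · next h =>
      have hlt : (k - m) % per.length + i < per.length := by rw [hcl] at h; omega
      have he : (k - m + i) % per.length = (k - m) % per.length + i := by
        rw [hmod i]; exact Nat.mod_eq_of_lt hlt
      simp only [List.getElem_take, List.getElem_drop]
      rw [he, List.getD_eq_getElem per '_' hlt]
    · next h =>
      have hge : per.length ≤ (k - m) % per.length + i := by rw [hcl] at h; omega
      have he : (k - m + i) % per.length = (k - m) % per.length + i - per.length := by
        rw [hmod i, Nat.mod_eq_sub_mod hge]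
        exact Nat.mod_eq_of_lt (by omega)
      simp only [List.getElem_take]
      rw [he, List.getD_eq_getElem per '_' (by omega)]
      congr 1
      rw [hcl] at h ⊢
      omega

theorem solution_spec : Claim_equal_solution := by
  unfold Claim_equal_solution Spec_solution
  intro n text second hdom hpre
  obtain ⟨hs0, hn1, hneg⟩ := hpre
  by_cases hz : second = 0
  · subst hz
    by_cases hn : (0:Int) ≤ n
    · simp only [solution, solution_alt, if_pos hn]
      simp [pvOuter, PySem.List.slice_to _ (le_refl (0:Int))]
    · -- n < 0, hence text ≠ "" and n.toNat = 0
      have htext : text ≠ "" := by tauto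
      have hL : 0 < (text.toList.map (fun c => if c = ' ' then '_' else c)).length := by
        simp only [List.length_map]
        cases he : text.toList with
        | nil => exact absurd (by rw [← text.toList_inj]; simp [he]) htext
        | cons a l => simp
      simp only [solution, solution_alt, if_neg (by omega : ¬ (0:Int) ≤ n)]
      rw [show n.toNat = 0 from by omega]
      simp only [List.replicate_zero, List.append_nil]
      rw [PySem.Int.mod_eq_emod_of_pos (by exact_mod_cast hL)]
      have hchunk : PySem.List.slice (text.toList.map (fun c => if c = ' ' then '_' else c))
          (some ((0 - n) % ((text.toList.map (fun c => if c = ' ' then '_' else c)).length : Int)))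
          (some ((0 - n) % ((text.toList.map (fun c => if c = ' ' then '_' else c)).length : Int) + n)) = [] := by
        apply List.eq_nil_of_length_eq_zero
        rw [PySem.List.length_slice]
        set L := (text.toList.map (fun c => if c = ' ' then '_' else c)).length with hLdef
        set st : Int := (0 - n) % (L : Int) with hstdef
        have hx1 : 0 ≤ st := Int.emod_nonneg _ (by exact_mod_cast (by omega : L ≠ 0))
        have hx2 : st < (L : Int) := Int.emod_lt_of_pos _ (by exact_mod_cast hL)
        have hx3 : -n < (L : Int) → st = -n := fun h => by
          rw [hstdef, show (0:Int) - n = -n from by ring]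
          exact Int.emod_eq_of_lt (by omega) h
        clear_value st
        simp only [PySem.List.clampIdx]
        split_ifs <;> omega
      rw [hchunk]
      simp [pvOuter, show ¬ (0:Int) < n from by omega]
  · -- second > 0, hence 1 ≤ n; move to Nat variables
    have hn1' : (1:Int) ≤ n := by tauto
    obtain ⟨m, rfl⟩ : ∃ m : Nat, n = (m : Int) := ⟨n.toNat, by omega⟩
    obtain ⟨k, rfl⟩ : ∃ k : Nat, second = (k : Int) := ⟨second.toNat, by omega⟩
    have hm : 1 ≤ m := by exact_mod_cast hn1'
    simp only [solution, solution_alt, Int.toNat_natCast]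
    set P : List Char := text.toList.map (fun c => if c = ' ' then '_' else c) ++ List.replicate m '_' with hP
    have hPlen : P.length = text.toList.length + m := by simp [hP]
    have hA : pvOuter text.toList m (k + 1) (List.replicate m '_') (k:Int)
        = (List.replicate m '_' ++ pvCyc P k).drop k := by
      rw [pvOuter_eq text.toList m hm _ (k:Int) _ (by omega) (by push_cast; omega)]
      rw [Int.toNat_natCast]
      rw [pvPush_eq_drop _ _ (by simp; omega)]
      congr 1
      simp [pvCyc]
    rw [hA]
    by_cases hle : (k:Int) ≤ (m:Int)
    · rw [if_pos hle]
      have hkm : k ≤ m := by exact_mod_cast hle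
      rw [pvCyc_small (by omega : k ≤ P.length)]
      rw [List.drop_append_of_le_length (by simp; omega), List.drop_replicate]
      rw [PySem.List.slice_to _ (by omega : (0:Int) ≤ (k:Int))]
      rw [Int.toNat_natCast, show ((m:Int) - (k:Int)).toNat = m - k from by omega]
    · rw [if_neg hle]
      have hkm : m ≤ k := by omega
      have hp0 : (0:Int) < (P.length : Int) := by exact_mod_cast (by omega : 0 < P.length)
      have hst : PySem.Int.mod ((k:Int) - (m:Int)) (P.length : Int)
          = (((k - m) % P.length : Nat) : Int) := by
        rw [PySem.Int.mod_eq_emod_of_pos hp0,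
          show ((k:Int) - (m:Int)) = (((k - m : Nat)) : Int) from by push_cast; omega]
        norm_cast
      rw [hst]
      rw [show ((((k - m) % P.length : Nat)) : Int) + (m:Int)
          = (((k - m) % P.length + m : Nat) : Int) from by push_cast; ring]
      rw [PySem.List.slice_natCast, Nat.add_sub_cancel_left]
      have hdrop : (List.replicate m '_' ++ pvCyc P k).drop k = (pvCyc P k).drop (k - m) := by
        calc (List.replicate m '_' ++ pvCyc P k).drop k
            = (List.replicate m '_' ++ pvCyc P k).drop ((List.replicate m '_' : List Char).length + (k - m)) := by
              congr 1
              simp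
              omega
          _ = (pvCyc P k).drop (k - m) := by
              rw [List.drop_append]
              simp
      rw [hdrop, pvWrap P m k (by omega) (by omega) hkm]
      set c : List Char := List.take m (List.drop ((k - m) % P.length) P) with hc0
      have hclen : c.length ≤ m := by simp [hc0]
      by_cases hc : (c.length : Int) < (m : Int)
      · rw [if_pos hc]
        rw [PySem.List.slice_to _ (by omega : (0:Int) ≤ (m:Int) - (c.length : Int))]
        rw [show ((m:Int) - (c.length : Int)).toNat = m - c.length from by omega]
      · rw [if_neg hc]
        have hlen : c.length = m := by omega
        simp [hlen]
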